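-- pv_equiv track=rewrite | github.com/arminam3/testino | extensions/utils.py | english_numbers_convertor
-- ===== SOURCE A (Python) =====
-- def english_numbers_convertor(number):
--     persian_num = {
--         "0": "۰",
--         "1": "۱",
--         "2": "۲",
--         "3": "۳",
--         "4": "۴",
--         "5": "۵",
--         "6": "۶",
--         "7": "۷",
--         "8": "۸",
--         "9": "۹",
--     }
--     for e, p in persian_num.items():
--         number = number.replace(e, p)
--     return number
-- ===== SOURCE B (Python) =====
-- def english_numbers_convertor(number):
--     out = []
--     for ch in number:
--         if "0" <= ch <= "9":
--             out.append(chr(0x06F0 + ord(ch) - 48))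
--         else:
--             out.append(ch)
--     return "".join(out)
-- ===== Notes on version B (the rewrite author's own statement) =====
-- stated objective: alternative
-- what changed: Replaces ten sequential full-string .replace passes driven by a digit dict with a single dict-free character pass that converts each ASCII digit arithmetically to the contiguous Persian digit block (chr(0x06F0 + ord(ch) - 48)) and passes other characters through.
import Mathlib
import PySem

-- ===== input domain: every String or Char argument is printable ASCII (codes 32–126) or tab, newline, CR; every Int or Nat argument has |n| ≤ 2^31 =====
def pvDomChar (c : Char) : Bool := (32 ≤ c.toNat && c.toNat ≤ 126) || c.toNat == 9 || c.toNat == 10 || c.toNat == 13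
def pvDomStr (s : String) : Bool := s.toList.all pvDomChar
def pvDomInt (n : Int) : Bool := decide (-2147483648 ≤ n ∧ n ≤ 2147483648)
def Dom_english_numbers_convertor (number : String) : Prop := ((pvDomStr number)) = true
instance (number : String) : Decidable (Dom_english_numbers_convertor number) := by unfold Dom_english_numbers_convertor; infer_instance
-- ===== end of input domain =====

-- B drops the digit dict and the ten full-string .replace passes: one dict-free
-- character pass converting each ASCII digit arithmetically into the contiguous
-- Persian digit block (code point 0x06F0 + digit); objective: alternative.

-- ===== PORT A =====
def pvPersianPairs : List (String × String) :=
  [("0", "۰"), ("1", "۱"), ("2", "۲"), ("3", "۳"), ("4", "۴"),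
   ("5", "۵"), ("6", "۶"), ("7", "۷"), ("8", "۸"), ("9", "۹")]

def english_numbers_convertor (number : String) : String :=
  let persian_num : PySem.Dict String String := PySem.Dict.ofList pvPersianPairs
  persian_num.items.foldl (fun n ep => PySem.Str.replace n ep.1 ep.2) number

-- ===== PORT B =====
-- Source B appends one character per input character and joins with ""; the join of
-- singleton characters is exactly String.ofList of the mapped character list.
def english_numbers_convertor_alt (number : String) : String :=
  String.ofList (number.toList.map (fun ch =>
    if '0' ≤ ch ∧ ch ≤ '9' then Char.ofNat (0x06F0 + ch.toNat - 48) else ch))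

-- ===== PRECONDITION & SPEC =====
def Spec_english_numbers_convertor (number : String) (out : String) : Prop := out = english_numbers_convertor_alt number
instance (number : String) (out : String) : Decidable (Spec_english_numbers_convertor number out) := by unfold Spec_english_numbers_convertor; infer_instance

-- ===== CLAIM (what is proved, stated in full; the proofs are below) =====
def Claim_equal_english_numbers_convertor : Prop := ∀ (number : String), Dom_english_numbers_convertor number → Spec_english_numbers_convertor number (english_numbers_convertor number)

-- ===== LEMMAS AND PROOFS =====

-- single-character Python replace is a per-character map
theorem replace_go_single (e p : Char) :
    ∀ (fuel : Nat) (l acc : List Char), l.length ≤ fuel →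
      PySem.Chars.replace.go [e] [p] fuel l acc =
        acc.reverse ++ l.map (fun c => if c = e then p else c) := by
  intro fuel
  induction fuel with
  | zero => intro l acc h; simp at h; simp [h, PySem.Chars.replace.go]
  | succ n ih =>
    intro l acc h
    cases l with
    | nil => simp [PySem.Chars.replace.go]
    | cons c t =>
      simp only [PySem.Chars.replace.go]
      by_cases hc : c = e
      · subst hc
        simp only [List.isPrefixOf, BEq.rfl, Bool.true_and, if_true,
          List.length_cons, List.length_nil, List.drop_succ_cons, List.drop_zero]
        rw [ih t ([p].reverse ++ acc) (by simpa using Nat.le_of_succ_le_succ h)]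
        simp
      · have : [e].isPrefixOf (c :: t) = false := by
          simp [List.isPrefixOf]; exact fun hec => absurd hec.symm hc
        simp only [this, Bool.false_eq_true, if_false]
        rw [ih t (c :: acc) (by simpa using Nat.le_of_succ_le_succ h)]
        simp [hc]

theorem replace_single (e p : Char) (s : List Char) :
    PySem.Chars.replace s [e] [p] = s.map (fun c => if c = e then p else c) := by
  simp [PySem.Chars.replace, replace_go_single e p s.length s [] le_rfl]

def pvF (c : Char) : Char :=
  if c = '0' then '۰' else if c = '1' then '۱' else if c = '2' then '۲' else
  if c = '3' then '۳' else if c = '4' then '۴' else if c = '5' then '۵' else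
  if c = '6' then '۶' else if c = '7' then '۷' else if c = '8' then '۸' else
  if c = '9' then '۹' else c

theorem comp_eq (c : Char) :
    (fun c => if c = '9' then '۹' else c)
    ((fun c => if c = '8' then '۸' else c)
    ((fun c => if c = '7' then '۷' else c)
    ((fun c => if c = '6' then '۶' else c)
    ((fun c => if c = '5' then '۵' else c)
    ((fun c => if c = '4' then '۴' else c)
    ((fun c => if c = '3' then '۳' else c)
    ((fun c => if c = '2' then '۲' else c)
    ((fun c => if c = '1' then '۱' else c)
    ((fun c => if c = '0' then '۰' else c) c))))))))) = pvF c := by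
  simp only [pvF]
  by_cases h0 : c = '0'; · simp [h0]
  by_cases h1 : c = '1'; · simp [h1]
  by_cases h2 : c = '2'; · simp [h2]
  by_cases h3 : c = '3'; · simp [h3]
  by_cases h4 : c = '4'; · simp [h4]
  by_cases h5 : c = '5'; · simp [h5]
  by_cases h6 : c = '6'; · simp [h6]
  by_cases h7 : c = '7'; · simp [h7]
  by_cases h8 : c = '8'; · simp [h8]
  by_cases h9 : c = '9'; · simp [h9]
  simp [h0, h1, h2, h3, h4, h5, h6, h7, h8, h9]

-- B's arithmetic digit shift agrees with A's ten-way case map on every character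
theorem arith_eq_pvF (c : Char) :
    (if '0' ≤ c ∧ c ≤ '9' then Char.ofNat (0x06F0 + c.toNat - 48) else c) = pvF c := by
  by_cases h0 : c = '0'; · subst h0; decide
  by_cases h1 : c = '1'; · subst h1; decide
  by_cases h2 : c = '2'; · subst h2; decide
  by_cases h3 : c = '3'; · subst h3; decide
  by_cases h4 : c = '4'; · subst h4; decide
  by_cases h5 : c = '5'; · subst h5; decide
  by_cases h6 : c = '6'; · subst h6; decide
  by_cases h7 : c = '7'; · subst h7; decide
  by_cases h8 : c = '8'; · subst h8; decide
  by_cases h9 : c = '9'; · subst h9; decide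
  have hnd : ¬ ('0' ≤ c ∧ c ≤ '9') := by
    rintro ⟨hl, hr⟩
    have hl' : 48 ≤ c.toNat := hl
    have hr' : c.toNat ≤ 57 := hr
    have hofn : Char.ofNat c.toNat = c := Char.ofNat_toNat c
    interval_cases h : c.toNat <;>
      first
      | exact h0 (hofn.symm.trans (by decide))
      | exact h1 (hofn.symm.trans (by decide))
      | exact h2 (hofn.symm.trans (by decide))
      | exact h3 (hofn.symm.trans (by decide))
      | exact h4 (hofn.symm.trans (by decide))
      | exact h5 (hofn.symm.trans (by decide))
      | exact h6 (hofn.symm.trans (by decide))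
      | exact h7 (hofn.symm.trans (by decide))
      | exact h8 (hofn.symm.trans (by decide))
      | exact h9 (hofn.symm.trans (by decide))
  simp [hnd, pvF, h0, h1, h2, h3, h4, h5, h6, h7, h8, h9]

set_option maxHeartbeats 1000000 in
theorem english_numbers_convertor_spec : Claim_equal_english_numbers_convertor := by
  intro number _
  unfold Spec_english_numbers_convertor english_numbers_convertor english_numbers_convertor_alt
  have hd : (PySem.Dict.ofList pvPersianPairs : PySem.Dict String String) = ⟨pvPersianPairs⟩ := by apply PySem.Dict.ext; decide
  rw [hd]
  simp only [pvPersianPairs, List.foldl_cons, List.foldl_nil, PySem.Str.replace]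
  rw [show ("0":String).toList = ['0'] from rfl, show ("1":String).toList = ['1'] from rfl,
      show ("2":String).toList = ['2'] from rfl, show ("3":String).toList = ['3'] from rfl,
      show ("4":String).toList = ['4'] from rfl, show ("5":String).toList = ['5'] from rfl,
      show ("6":String).toList = ['6'] from rfl, show ("7":String).toList = ['7'] from rfl,
      show ("8":String).toList = ['8'] from rfl, show ("9":String).toList = ['9'] from rfl,
      show ("۰":String).toList = ['۰'] from rfl, show ("۱":String).toList = ['۱'] from rfl,
      show ("۲":String).toList = ['۲'] from rfl, show ("۳":String).toList = ['۳'] from rfl,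
      show ("۴":String).toList = ['۴'] from rfl, show ("۵":String).toList = ['۵'] from rfl,
      show ("۶":String).toList = ['۶'] from rfl, show ("۷":String).toList = ['۷'] from rfl,
      show ("۸":String).toList = ['۸'] from rfl, show ("۹":String).toList = ['۹'] from rfl]
  simp only [replace_single, String.toList_ofList, List.map_map, Function.comp_def]
  refine congrArg String.ofList (List.map_congr_left fun c _ => ?_)
  rw [arith_eq_pvF]
  exact comp_eq c
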